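-- pv_equiv track=rewrite | github.com/stevenpozo/construex_code | 002_Scraping_Apify/Scraping_mexico/upload_data_apify_batch.py | process_photos_data
-- ===== SOURCE A (Python) =====
-- from typing import List, Dict, Any, Optional
--
-- def process_photos_data(photos_data: List[Dict[str, Any]]) -> Dict[str, List[Dict[str, Any]]]:
--     """Process APIFY_ACTOR_PHOTOS data and group by facebookUrl."""
--     grouped = {}
--
--     for item in photos_data:
--         facebook_url = item.get("facebookUrl", "")
--         if not facebook_url:
--             continue
--
--         if facebook_url not in grouped:
--             grouped[facebook_url] = []
--
--         photo_item = {
--             "image": item.get("image", ""),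
--             "facebookUrl": facebook_url
--         }
--         grouped[facebook_url].append(photo_item)
--
--     return grouped
-- ===== SOURCE B (Python) =====
-- def process_photos_data(photos_data):
--     """Process APIFY_ACTOR_PHOTOS data and group by facebookUrl.
--
--     Two-pass re-implementation: first compute the ordered distinct non-empty
--     urls, then build each group with its own scan (comprehension) instead of
--     A's single pass that mutates a dict of lists.
--     """
--     urls = [item.get("facebookUrl", "") for item in photos_data]
--     keys = [u for u in dict.fromkeys(urls) if u]
--     return {
--         u: [
--             {"image": item.get("image", ""), "facebookUrl": u}
--             for item in photos_data
--             if item.get("facebookUrl", "") == u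
--         ]
--         for u in keys
--     }
-- ===== Notes on version B (the rewrite author's own statement) =====
-- stated objective: alternative
-- what changed: Replaced the single pass that mutates a dict of lists with a declarative two-pass version: collect the ordered distinct non-empty urls (dict.fromkeys), then build each group by its own comprehension scan over the input.
import Mathlib
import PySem

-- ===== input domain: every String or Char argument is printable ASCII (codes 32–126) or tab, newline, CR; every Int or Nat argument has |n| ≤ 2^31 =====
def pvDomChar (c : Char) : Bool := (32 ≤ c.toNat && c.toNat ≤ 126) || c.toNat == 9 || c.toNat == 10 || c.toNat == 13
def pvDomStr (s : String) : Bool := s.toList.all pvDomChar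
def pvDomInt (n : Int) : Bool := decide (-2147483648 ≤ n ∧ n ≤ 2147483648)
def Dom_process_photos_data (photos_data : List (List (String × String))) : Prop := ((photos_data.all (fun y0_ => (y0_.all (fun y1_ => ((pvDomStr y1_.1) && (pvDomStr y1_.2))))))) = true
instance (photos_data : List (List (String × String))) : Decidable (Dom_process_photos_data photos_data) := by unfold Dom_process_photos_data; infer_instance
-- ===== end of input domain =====

-- B replaces A's single mutate-a-dict-of-lists pass by a two-pass version (distinct keys first,
-- then one scan per key); same return value, no speed claim (B is O(n*k)).

-- item.get(key, "") on the item dict (first-match lookup on the association list)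
def pvItemGetD (it : List (String × String)) (k : String) : String :=
  (PySem.Dict.mk it).getD k ""

-- ===== PORT A =====
def process_photos_data (photos_data : List (List (String × String))) : List (String × List (List (String × String))) :=
  (photos_data.foldl
    (fun grouped item =>
      let facebook_url := pvItemGetD item "facebookUrl"
      if facebook_url = "" then grouped
      else
        let grouped :=
          if grouped.contains facebook_url then grouped
          else grouped.insert facebook_url []
        let photo_item : List (String × String) :=
          [("image", pvItemGetD item "image"), ("facebookUrl", facebook_url)]
        grouped.modify facebook_url [] (fun l => l ++ [photo_item]))
    PySem.Dict.empty).items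

-- ===== PORT B =====
def process_photos_data_alt (photos_data : List (List (String × String))) : List (String × List (List (String × String))) :=
  let urls := photos_data.map (fun item => pvItemGetD item "facebookUrl")
  let keys := (PySem.Set.ofList urls).filter (fun u => u != "")
  keys.map (fun u =>
    (u, (photos_data.filter (fun item => pvItemGetD item "facebookUrl" == u)).map
          (fun item => [("image", pvItemGetD item "image"), ("facebookUrl", u)])))

-- ===== PRECONDITION & SPEC =====
def Spec_process_photos_data (photos_data : List (List (String × String))) (out : List (String × List (List (String × String)))) : Prop := out = process_photos_data_alt photos_data
instance (photos_data : List (List (String × String))) (out : List (String × List (List (String × String)))) : Decidable (Spec_process_photos_data photos_data out) := by unfold Spec_process_photos_data; infer_instance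

-- ===== CLAIM (what is proved, stated in full; the proofs are below) =====
def Claim_equal_process_photos_data : Prop := ∀ (photos_data : List (List (String × String))), Dom_process_photos_data photos_data → Spec_process_photos_data photos_data (process_photos_data photos_data)

-- ===== LEMMAS AND PROOFS =====

-- the url and the photo record A builds from an item
def pvUrl (it : List (String × String)) : String := pvItemGetD it "facebookUrl"
def pvPhoto (it : List (String × String)) : List (String × String) :=
  [("image", pvItemGetD it "image"), ("facebookUrl", pvUrl it)]

-- the (url, photo) pairs A actually processes (items with non-empty url)
def pvPairs (pd : List (List (String × String))) : List (String × List (String × String)) :=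
  (pd.filter (fun it => pvUrl it != "")).map (fun it => (pvUrl it, pvPhoto it))

-- A's step collapses to a single Dict.modify
theorem pvStep_eq (g : PySem.Dict String (List (List (String × String)))) (item : List (String × String)) :
    (let facebook_url := pvItemGetD item "facebookUrl"
     if facebook_url = "" then g
     else
       let g' := if g.contains facebook_url then g else g.insert facebook_url []
       let photo_item : List (String × String) :=
         [("image", pvItemGetD item "image"), ("facebookUrl", facebook_url)]
       g'.modify facebook_url [] (fun l => l ++ [photo_item]))
    = (if pvUrl item = "" then g else g.modify (pvUrl item) [] (fun l => l ++ [pvPhoto item])) := by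
  simp only [pvUrl, pvPhoto]
  by_cases h : pvItemGetD item "facebookUrl" = ""
  · simp [h]
  · simp only [h]
    by_cases hc : g.contains (pvItemGetD item "facebookUrl")
    · simp [hc]
    · simp only [hc, Bool.false_eq_true, ite_false]
      simp only [PySem.Dict.modify, PySem.Dict.getD_insert_self, PySem.Dict.insert_insert_self]
      rw [PySem.Dict.getD_of_not_contains _ _ (by simpa using hc)]

-- A's fold equals the pair-form grouping fold over pvPairs
theorem pvFold_eq (pd : List (List (String × String)))
    (g : PySem.Dict String (List (List (String × String)))) :
    pd.foldl
      (fun grouped item =>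
        let facebook_url := pvItemGetD item "facebookUrl"
        if facebook_url = "" then grouped
        else
          let grouped :=
            if grouped.contains facebook_url then grouped
            else grouped.insert facebook_url []
          let photo_item : List (String × String) :=
            [("image", pvItemGetD item "image"), ("facebookUrl", facebook_url)]
          grouped.modify facebook_url [] (fun l => l ++ [photo_item])) g
    = (pvPairs pd).foldl (fun d p => d.modify p.1 [] (fun l => l ++ [p.2])) g := by
  induction pd generalizing g with
  | nil => simp [pvPairs]
  | cons it rest ih =>
    simp only [List.foldl_cons]
    rw [pvStep_eq]
    by_cases h : pvUrl it = ""
    · simp only [pvPairs, List.filter_cons, h]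
      simp [pvPairs] at ih ⊢
      simpa [h] using ih _
    · simp only [if_neg h]
      have : pvPairs (it :: rest) = (pvUrl it, pvPhoto it) :: pvPairs rest := by
        simp [pvPairs, h]
      rw [this, List.foldl_cons]
      exact ih _

-- first-occurrence dedup commutes with filter
theorem pvOfList_filter {α : Type} [BEq α] [LawfulBEq α] (p : α → Bool) (xs : List α) :
    PySem.Set.ofList (xs.filter p) = (PySem.Set.ofList xs).filter p := by
  induction xs with
  | nil => simp [PySem.Set.ofList_nil]
  | cons x xs ih =>
    rw [PySem.Set.ofList_cons, List.filter_cons]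
    by_cases hp : p x
    · rw [if_pos hp, PySem.Set.ofList_cons, List.filter_cons, if_pos hp, ih]
      simp only [PySem.Set.discard, List.filter_filter]
      congr 1
      exact List.filter_congr (fun a _ => Bool.and_comm _ _)
    · rw [if_neg hp, List.filter_cons, if_neg hp, ih]
      simp only [PySem.Set.discard, List.filter_filter]
      apply List.filter_congr
      intro y _
      by_cases hyx : y = x
      · subst hyx; simp [hp]
      · simp [hyx]

-- ===== VERDICT (by name: the statement is the Claim_ definition above) =====
theorem process_photos_data_spec : Claim_equal_process_photos_data := by
  intro pd _
  show process_photos_data pd = process_photos_data_alt pd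
  unfold process_photos_data process_photos_data_alt
  rw [pvFold_eq]
  have hnd : ((pvPairs pd).foldl (fun d p => d.modify p.1 [] (fun l => l ++ [p.2]))
      PySem.Dict.empty).keys.Nodup := by
    have := PySem.Dict.nodup_keys_foldl_modify_key (pvPairs pd) (fun p => p.1) []
      (fun _ p l => l ++ [p.2]) PySem.Dict.empty (by simp)
    simpa using this
  rw [PySem.Dict.items_eq_map_keys _ hnd []]
  have hkeys : ((pvPairs pd).foldl (fun d p => d.modify p.1 [] (fun l => l ++ [p.2]))
      PySem.Dict.empty).keys
      = (PySem.Set.ofList (pd.map (fun it => pvItemGetD it "facebookUrl"))).filter (fun u => u != "") := by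
    have := PySem.Dict.keys_foldl_modify_key (pvPairs pd) (fun p => p.1) []
      (fun _ p l => l ++ [p.2]) PySem.Dict.empty
    simp only at this
    rw [this]
    have hmap : (pvPairs pd).map (fun p => p.1)
        = (pd.map (fun it => pvItemGetD it "facebookUrl")).filter (fun u => u != "") := by
      simp [pvPairs, List.filter_map, Function.comp_def, pvUrl]
    rw [hmap, PySem.Dict.keys_empty]
    rw [PySem.Set.update_nil_left ((pd.map (fun it => pvItemGetD it "facebookUrl")).filter (fun u => u != ""))]
    exact (pvOfList_filter (α := String) (fun u => u != "") (pd.map (fun it => pvItemGetD it "facebookUrl")))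
  rw [hkeys]
  apply List.map_congr_left
  intro u hu
  simp only [List.mem_filter, bne_iff_ne, ne_eq] at hu
  congr 1
  rw [PySem.Dict.getD_foldl_modify_append]
  rw [PySem.Dict.getD_empty]
  simp only [List.nil_append, pvPairs, List.filter_map, Function.comp_def]
  rw [List.filter_filter]
  have hfilt : ∀ it : List (String × String),
      ((pvUrl it == u) && (pvUrl it != "")) = (pvItemGetD it "facebookUrl" == u) := by
    intro it
    by_cases h : pvUrl it = u
    · simp [pvUrl] at h ⊢; simp [h, hu.2]
    · simp [pvUrl] at h ⊢; simp [h]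
  rw [List.filter_congr (fun it _ => hfilt it)]
  rw [List.map_map]
  apply List.map_congr_left
  intro it hit
  simp only [List.mem_filter, beq_iff_eq] at hit
  simp [pvPhoto, pvUrl, hit.2]
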